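-- pv_equiv track=rewrite | github.com/Bugsfounder/Python | tutorials/118_PythonProblem8FakeMultiplicationTables.py | checkTableIsCorrect
-- ===== SOURCE A (Python) =====
-- def checkTableIsCorrect(lst, tableOf):
--     wrongTable = lst
--     correctTable = []
--     for i in range(len(lst)):
--         correctTable.append(tableOf * (i + 1))
--
--     for i in range(len(correctTable)):
--         wrongIndex = 0
--         if correctTable[i] != wrongTable[i]:
--             wrongIndex = i
--             return f"The Table is Wrong on {i} index. It is {wrongTable[i]} but it must be has {correctTable[i]}"
-- ===== SOURCE B (Python) =====
-- def checkTableIsCorrect(lst, tableOf):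
--     bad = [i for i in range(len(lst)) if lst[i] != tableOf * (i + 1)]
--     if bad:
--         i = min(bad)
--         return f"The Table is Wrong on {i} index. It is {lst[i]} but it must be has {tableOf * (i + 1)}"
-- ===== Notes on version B (the rewrite author's own statement) =====
-- stated objective: alternative
-- what changed: Instead of materialising the expected table and scanning it with an early return, B first collects the list of ALL mismatching indices with one comprehension and then selects the smallest one with min(), rebuilding the expected value only for that index.
import Mathlib
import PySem

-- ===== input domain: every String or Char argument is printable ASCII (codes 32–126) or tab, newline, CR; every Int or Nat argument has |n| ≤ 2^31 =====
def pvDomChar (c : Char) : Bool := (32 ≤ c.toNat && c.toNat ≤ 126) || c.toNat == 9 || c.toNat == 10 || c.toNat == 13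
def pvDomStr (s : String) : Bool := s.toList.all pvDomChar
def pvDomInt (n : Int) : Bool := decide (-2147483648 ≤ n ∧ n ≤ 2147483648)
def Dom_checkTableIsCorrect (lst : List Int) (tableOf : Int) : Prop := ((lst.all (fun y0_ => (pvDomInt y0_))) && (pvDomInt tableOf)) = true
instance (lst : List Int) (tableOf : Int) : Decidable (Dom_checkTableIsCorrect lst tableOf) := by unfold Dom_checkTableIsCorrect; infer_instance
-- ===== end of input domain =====

-- B replaces A's build-expected-table-then-scan-with-early-return by a collect-then-select
-- strategy: one comprehension gathers every mismatching index, min() picks the smallest.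

-- ===== PORT A =====
-- second loop of A: for i in range(len(correctTable)): if correctTable[i] != wrongTable[i]: return …
def checkA_loop (correctTable wrongTable : List Int) : List Nat → Option String
  | [] => none
  | i :: rest =>
    match PySem.List.pyGet? correctTable (Int.ofNat i), PySem.List.pyGet? wrongTable (Int.ofNat i) with
    | some c, some w =>
      if c ≠ w then
        some ("The Table is Wrong on " ++ PySem.Int.toStr (Int.ofNat i) ++ " index. It is "
              ++ PySem.Int.toStr w ++ " but it must be has " ++ PySem.Int.toStr c)
      else checkA_loop correctTable wrongTable rest
    | _, _ => none  -- unreachable: i < length (totality guard for the IndexError case)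

def checkTableIsCorrect (lst : List Int) (tableOf : Int) : Option String :=
  let wrongTable := lst
  let correctTable := (List.range lst.length).foldl
    (fun acc i => acc ++ [tableOf * ((Int.ofNat i) + 1)]) ([] : List Int)
  checkA_loop correctTable wrongTable (List.range correctTable.length)

-- ===== PORT B =====
-- bad = [i for i in range(len(lst)) if lst[i] != tableOf * (i + 1)]
def badIndices (lst : List Int) (tableOf : Int) : List Nat :=
  (List.range lst.length).filter
    (fun i => PySem.List.pyGet? lst (Int.ofNat i) ≠ some (tableOf * ((Int.ofNat i) + 1)))

def checkTableIsCorrect_alt (lst : List Int) (tableOf : Int) : Option String :=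
  match PySem.List.min? (badIndices lst tableOf) (fun x => x) with
  | none => none
  | some i =>
    match PySem.List.pyGet? lst (Int.ofNat i) with
    | some v =>
      some ("The Table is Wrong on " ++ PySem.Int.toStr (Int.ofNat i) ++ " index. It is "
            ++ PySem.Int.toStr v ++ " but it must be has " ++ PySem.Int.toStr (tableOf * ((Int.ofNat i) + 1)))
    | none => none  -- unreachable: i ∈ range(len(lst))

-- ===== PRECONDITION & SPEC =====
def Spec_checkTableIsCorrect (lst : List Int) (tableOf : Int) (out : Option String) : Prop := out = checkTableIsCorrect_alt lst tableOf
instance (lst : List Int) (tableOf : Int) (out : Option String) : Decidable (Spec_checkTableIsCorrect lst tableOf out) := by unfold Spec_checkTableIsCorrect; infer_instance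

-- ===== CLAIM (what is proved, stated in full; the proofs are below) =====
def Claim_equal_checkTableIsCorrect : Prop := ∀ (lst : List Int) (tableOf : Int), Dom_checkTableIsCorrect lst tableOf → Spec_checkTableIsCorrect lst tableOf (checkTableIsCorrect lst tableOf)

-- ===== LEMMAS AND PROOFS =====

-- A's first loop builds the list of expected values.
theorem correctTable_eq (n : Nat) (tableOf : Int) :
    (List.range n).foldl (fun acc i => acc ++ [tableOf * ((Int.ofNat i) + 1)]) ([] : List Int)
      = (List.range n).map (fun i => tableOf * ((Int.ofNat i) + 1)) := by
  simpa using PySem.List.foldl_append_singleton_eq_map (l := List.range n)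
    (f := fun i => tableOf * ((Int.ofNat i) + 1))

-- "first match of the scan" view of B: head of the filtered index list, then the message.
def headMsg (lst : List Int) (tableOf : Int) (bad : List Nat) : Option String :=
  match bad.head? with
  | none => none
  | some i =>
    match PySem.List.pyGet? lst (Int.ofNat i) with
    | some v =>
      some ("The Table is Wrong on " ++ PySem.Int.toStr (Int.ofNat i) ++ " index. It is "
            ++ PySem.Int.toStr v ++ " but it must be has " ++ PySem.Int.toStr (tableOf * ((Int.ofNat i) + 1)))
    | none => none

theorem checkA_loop_eq (lst : List Int) (tableOf : Int) :
    ∀ (m k : Nat), k + m = lst.length →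
      checkA_loop ((List.range lst.length).map (fun i => tableOf * ((Int.ofNat i) + 1))) lst
        (List.range' k m)
      = headMsg lst tableOf
          ((List.range' k m).filter
            (fun i => PySem.List.pyGet? lst (Int.ofNat i) ≠ some (tableOf * ((Int.ofNat i) + 1)))) := by
  intro m
  induction m with
  | zero =>
    intro k hk
    simp [List.range', checkA_loop, headMsg]
  | succ m ih =>
    intro k hk
    have hk' : k < lst.length := by omega
    have hget : PySem.List.pyGet? lst (Int.ofNat k) = some lst[k] := by
      simp [PySem.List.pyGet?_ofNat (h := hk')]
    have hgetc : PySem.List.pyGet?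
        ((List.range lst.length).map (fun i => tableOf * ((Int.ofNat i) + 1))) (Int.ofNat k)
        = some (tableOf * ((Int.ofNat k) + 1)) := by
      have hlen : k < ((List.range lst.length).map (fun i => tableOf * ((Int.ofNat i) + 1))).length := by
        simpa using hk'
      simpa using PySem.List.pyGet?_ofNat (h := hlen)
    rw [List.range'_succ]
    by_cases h : tableOf * ((Int.ofNat k) + 1) = lst[k]
    · simp only [checkA_loop, List.filter_cons, hget, hgetc, h, ne_eq, not_true_eq_false,
        if_false, decide_not, decide_true, Bool.not_true, Bool.false_eq_true]
      simpa using ih (k + 1) (by omega)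
    · simp only [checkA_loop, headMsg, List.filter_cons, hget, hgetc]
      rw [if_pos h, if_pos (by simpa using fun e => h e.symm)]
      simp [List.getElem?_eq_getElem hk']

theorem foldl_min_of_le {x : Nat} {t : List Nat} (h : ∀ y ∈ t, x ≤ y) : t.foldl min x = x := by
  induction t with
  | nil => rfl
  | cons y t ih =>
    have hx : min x y = x := by
      have := h y (List.mem_cons_self ..); omega
    simp only [List.foldl_cons, hx]
    exact ih (fun z hz => h z (List.mem_cons_of_mem _ hz))

-- min of a ≤-sorted list is its head.
theorem min?_of_sorted (l : List Nat) (h : l.Pairwise (· ≤ ·)) :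
    PySem.List.min? l (fun x => x) = l.head? := by
  cases l with
  | nil => simp [PySem.List.min?]
  | cons x t =>
    rw [PySem.List.min?_id_cons]
    have := List.pairwise_cons.mp h
    simp [foldl_min_of_le this.1]

theorem badIndices_sorted (lst : List Int) (tableOf : Int) :
    (badIndices lst tableOf).Pairwise (· ≤ ·) := by
  unfold badIndices
  exact ((List.pairwise_lt_range).filter _).imp (fun h => Nat.le_of_lt h)

theorem alt_eq_headMsg (lst : List Int) (tableOf : Int) :
    checkTableIsCorrect_alt lst tableOf = headMsg lst tableOf (badIndices lst tableOf) := by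
  unfold checkTableIsCorrect_alt headMsg
  rw [min?_of_sorted _ (badIndices_sorted lst tableOf)]


-- ===== VERDICT (by name: the statement is the Claim_ definition above) =====
theorem checkTableIsCorrect_spec : Claim_equal_checkTableIsCorrect := by
  intro lst tableOf _
  unfold Spec_checkTableIsCorrect checkTableIsCorrect
  rw [alt_eq_headMsg]
  simp only [correctTable_eq]
  have h := checkA_loop_eq lst tableOf lst.length 0 (by omega)
  simpa [List.range_eq_range', badIndices] using h
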